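-- pv_equiv track=rewrite | github.com/Bibhushan21/Thesis-Datacollection | app/main.py | has_problematic_chars
-- ===== SOURCE A (Python) =====
-- def has_problematic_chars(text):
--     """Check if text has characters that commonly break JSON."""
--     if not isinstance(text, str):
--         return False
--
--     # Much more aggressive detection - trigger base64 for any potentially problematic content
--     problematic_patterns = [
--         '\n',    # Any newlines
--         '"',     # Any quotes
--         '\\',    # Any backslashes
--         '\r',    # Carriage returns
--         '\t',    # Tabs
--         "'",     # Single quotes
--         '`',     # Backticks
--         '{',     # Curly braces
--         '}',     # Curly braces
--         '[',     # Square brackets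
--         ']',     # Square brackets
--     ]
--
--     # Also check for markdown patterns that often cause issues
--     markdown_patterns = [
--         '**',    # Bold text
--         '##',    # Headers
--         '###',   # Headers
--         '- **',  # List items with bold
--         '---',   # Horizontal rules
--     ]
--
--     all_patterns = problematic_patterns + markdown_patterns
--
--     for pattern in all_patterns:
--         if pattern in text:
--             return True
--
--     # Also trigger for any string longer than 500 chars (instead of 1000)
--     if len(text) > 500:
--         return True
--
--     return False
-- ===== SOURCE B (Python) =====
-- _BAD = '\n"\\\r\t\'`{}[]'
--
-- def has_problematic_chars(text):
--     """Check if text has characters that commonly break JSON."""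
--     if not isinstance(text, str):
--         return False
--     if len(text) > 500:
--         return True
--     return (any(c in _BAD for c in text)
--             or any(a == b and a in '*#' for a, b in zip(text, text[1:]))
--             or any(a == b == c == '-' for a, b, c in zip(text, text[1:], text[2:])))
-- ===== Notes on version B (the rewrite author's own statement) =====
-- stated objective: alternative
-- what changed: Replaces A's loop of 16 repeated substring scans by one length check plus single zip-based passes over the characters: a bad-character membership test, an adjacent-pair test for the doubled asterisk/hash markers, and an adjacent-triple test for the dash rule (the two redundant markdown patterns disappear).
import Mathlib
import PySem

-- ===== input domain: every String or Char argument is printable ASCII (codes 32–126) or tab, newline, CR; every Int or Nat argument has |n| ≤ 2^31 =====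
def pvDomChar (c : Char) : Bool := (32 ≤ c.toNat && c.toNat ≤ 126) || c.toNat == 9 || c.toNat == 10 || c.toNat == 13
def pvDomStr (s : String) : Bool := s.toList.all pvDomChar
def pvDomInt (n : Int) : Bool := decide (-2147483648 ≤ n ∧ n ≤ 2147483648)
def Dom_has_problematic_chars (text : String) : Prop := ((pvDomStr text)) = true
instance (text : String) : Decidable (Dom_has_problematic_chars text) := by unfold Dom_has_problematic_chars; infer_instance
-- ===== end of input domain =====

-- B replaces the 16 repeated substring scans by one length check plus single zip-based
-- passes over the characters (bad single chars, doubled '*'/'#', tripled '-'); objective: alternative.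


-- ===== PORT A =====
-- the two pattern lists of A, concatenated as in `all_patterns`
def pvAllPatterns : List String :=
  ["\n", "\"", "\\", "\r", "\t", "'", "`", "{", "}", "[", "]"] ++
  ["**", "##", "###", "- **", "---"]

def has_problematic_chars (text : String) : Bool :=
  -- 'for pattern in all_patterns: if pattern in text: return True'
  if pvAllPatterns.any (fun p => PySem.Str.isIn p text) then true
  else if PySem.Str.len text > 500 then true
  else false

-- ===== PORT B =====
def pvBadChars : List Char := ['\n', '"', '\\', '\r', '\t', '\'', '`', '{', '}', '[', ']']

def has_problematic_chars_alt (text : String) : Bool :=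
  if PySem.Str.len text > 500 then true
  else
    let l := text.toList
    (l.any (fun c => pvBadChars.contains c))
    || ((l.zip l.tail).any (fun p => p.1 == p.2 && (p.1 == '*' || p.1 == '#')))
    || ((l.zip (l.tail.zip l.tail.tail)).any
          (fun t => t.1 == t.2.1 && t.2.1 == t.2.2 && t.2.2 == '-'))

-- ===== PRECONDITION & SPEC =====
def Spec_has_problematic_chars (text : String) (out : Bool) : Prop := out = has_problematic_chars_alt text
instance (text : String) (out : Bool) : Decidable (Spec_has_problematic_chars text out) := by unfold Spec_has_problematic_chars; infer_instance

-- ===== CLAIM (what is proved, stated in full; the proofs are below) =====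
def Claim_equal_has_problematic_chars : Prop := ∀ (text : String), Dom_has_problematic_chars text → Spec_has_problematic_chars text (has_problematic_chars text)

-- ===== LEMMAS AND PROOFS =====

-- [a] is an infix iff a is a member
theorem pv_infix_singleton {a : Char} {l : List Char} : [a] <:+: l ↔ a ∈ l := by
  constructor
  · rintro ⟨s, t, rfl⟩; simp
  · intro h
    obtain ⟨s, t, rfl⟩ := List.append_of_mem h
    exact ⟨s, t, by simp⟩

-- adjacent-pair scan over zip l l.tail finds exactly the length-2 infixes
theorem pv_adj2 (f : Char → Char → Bool) :
    ∀ l : List Char,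
      ((l.zip l.tail).any (fun p => f p.1 p.2) = true) ↔
        ∃ a b, f a b = true ∧ [a, b] <:+: l := by
  intro l
  induction l with
  | nil => simp
  | cons c rest ih =>
    cases rest with
    | nil =>
      simp only [List.tail_cons, List.zip_nil_right, List.any_nil]
      constructor
      · intro h; cases h
      · rintro ⟨a, b, _, h⟩
        have := h.length_le; simp at this
    | cons d rest' =>
      simp only [List.tail_cons, List.zip_cons_cons, List.any_cons]
      rw [Bool.or_eq_true]
      constructor
      · rintro (h | h)
        · exact ⟨c, d, h, [], rest', rfl⟩
        · obtain ⟨a, b, hf, hinf⟩ := ih.mp h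
          exact ⟨a, b, hf, hinf.trans (List.suffix_cons c (d :: rest')).isInfix⟩
      · rintro ⟨a, b, hf, hinf⟩
        rcases List.infix_cons_iff.mp hinf with hp | hinf'
        · rcases List.cons_prefix_cons.mp hp with ⟨rfl, hp'⟩
          rcases List.cons_prefix_cons.mp hp' with ⟨rfl, _⟩
          exact Or.inl hf
        · exact Or.inr (ih.mpr ⟨a, b, hf, hinf'⟩)

-- adjacent-triple scan finds exactly the length-3 infixes
theorem pv_adj3 (f : Char → Char → Char → Bool) :
    ∀ l : List Char,
      ((l.zip (l.tail.zip l.tail.tail)).any (fun t => f t.1 t.2.1 t.2.2) = true) ↔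
        ∃ a b c, f a b c = true ∧ [a, b, c] <:+: l := by
  intro l
  induction l with
  | nil => simp
  | cons x rest ih =>
    cases rest with
    | nil =>
      simp only [List.tail_cons, List.tail_nil, List.zip_nil_right, List.any_nil]
      constructor
      · intro h; cases h
      · rintro ⟨a, b, c, _, h⟩
        have := h.length_le; simp at this
    | cons y rest' =>
      cases rest' with
      | nil =>
        simp only [List.tail_cons, List.zip_nil_right, List.any_nil]
        constructor
        · intro h; cases h
        · rintro ⟨a, b, c, _, h⟩
          have := h.length_le; simp at this
      | cons z rest'' =>
        simp only [List.tail_cons, List.zip_cons_cons, List.any_cons]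
        rw [Bool.or_eq_true]
        constructor
        · rintro (h | h)
          · exact ⟨x, y, z, h, [], rest'', rfl⟩
          · obtain ⟨a, b, c, hf, hinf⟩ := ih.mp h
            exact ⟨a, b, c, hf, hinf.trans (List.suffix_cons x (y :: z :: rest'')).isInfix⟩
        · rintro ⟨a, b, c, hf, hinf⟩
          rcases List.infix_cons_iff.mp hinf with hp | hinf'
          · rcases List.cons_prefix_cons.mp hp with ⟨rfl, hp'⟩
            rcases List.cons_prefix_cons.mp hp' with ⟨rfl, hp''⟩
            rcases List.cons_prefix_cons.mp hp'' with ⟨rfl, _⟩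
            exact Or.inl hf
          · exact Or.inr (ih.mpr ⟨a, b, c, hf, hinf'⟩)

-- B's pair scan with its concrete predicate
theorem pv_adj2' (l : List Char) :
    ((l.zip l.tail).any (fun p => p.1 == p.2 && (p.1 == '*' || p.1 == '#')) = true) ↔
      ['*', '*'] <:+: l ∨ ['#', '#'] <:+: l := by
  constructor
  · intro h
    obtain ⟨a, b, hf, hinf⟩ :=
      (pv_adj2 (fun a b => a == b && (a == '*' || a == '#')) l).mp h
    simp only [Bool.and_eq_true, Bool.or_eq_true, beq_iff_eq] at hf
    obtain ⟨hab', hs | hs⟩ := hf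
    · subst hab'; subst hs; exact Or.inl hinf
    · subst hab'; subst hs; exact Or.inr hinf
  · rintro (h | h)
    · exact (pv_adj2 (fun a b => a == b && (a == '*' || a == '#')) l).mpr
        ⟨'*', '*', by decide, h⟩
    · exact (pv_adj2 (fun a b => a == b && (a == '*' || a == '#')) l).mpr
        ⟨'#', '#', by decide, h⟩

-- B's triple scan with its concrete predicate
theorem pv_adj3' (l : List Char) :
    ((l.zip (l.tail.zip l.tail.tail)).any
        (fun t => t.1 == t.2.1 && t.2.1 == t.2.2 && t.2.2 == '-') = true) ↔
      ['-', '-', '-'] <:+: l := by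
  constructor
  · intro h
    obtain ⟨a, b, c, hf, hinf⟩ :=
      (pv_adj3 (fun a b c => a == b && b == c && c == '-') l).mp h
    simp only [Bool.and_eq_true, beq_iff_eq] at hf
    obtain ⟨⟨hab, hbc⟩, hc⟩ := hf
    subst hab; subst hbc; subst hc; exact hinf
  · intro h
    exact (pv_adj3 (fun a b c => a == b && b == c && c == '-') l).mpr
      ⟨'-', '-', '-', by decide, h⟩

-- B's bad-character scan
theorem pv_bad' (l : List Char) :
    (l.any (fun c => pvBadChars.contains c) = true) ↔ ∃ c ∈ l, c ∈ pvBadChars := by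
  simp [List.any_eq_true]

-- A's pattern disjunction, reduced: '###' gives '##', '- **' gives '**'
theorem pv_patterns_iff (l : List Char) :
    (pvAllPatterns.any (fun p => PySem.Chars.isIn p.toList l) = true) ↔
      ((∃ c ∈ l, c ∈ pvBadChars) ∨
        ['*', '*'] <:+: l ∨ ['#', '#'] <:+: l ∨ ['-', '-', '-'] <:+: l) := by
  simp only [pvAllPatterns, List.any_append, List.any_cons, List.any_nil,
    Bool.or_eq_true, Bool.false_eq_true, or_false, PySem.Chars.isIn_iff_infix]
  constructor
  · rintro (h | h)
    · rcases h with h | h | h | h | h | h | h | h | h | h | h <;>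
        exact Or.inl ⟨_, pv_infix_singleton.mp h, by decide⟩
    · rcases h with h | h | h | h | h
      · exact Or.inr (Or.inl h)
      · exact Or.inr (Or.inr (Or.inl h))
      · -- '###' contains '##'
        refine Or.inr (Or.inr (Or.inl (List.IsInfix.trans ?_ h)))
        exact (show (['#', '#'] : List Char) <+: ['#', '#', '#'] from ⟨['#'], rfl⟩).isInfix
      · -- '- **' contains '**'
        refine Or.inr (Or.inl (List.IsInfix.trans ?_ h))
        exact (show (['*', '*'] : List Char) <:+ ['-', ' ', '*', '*'] from ⟨['-', ' '], rfl⟩).isInfix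
      · exact Or.inr (Or.inr (Or.inr h))
  · rintro (⟨c, hc, hmem⟩ | h | h | h)
    · left
      have hinf := pv_infix_singleton.mpr hc
      fin_cases hmem <;> simp_all
    · exact Or.inr (Or.inl h)
    · exact Or.inr (Or.inr (Or.inl h))
    · exact Or.inr (Or.inr (Or.inr (Or.inr (Or.inr h))))

-- the core boolean identity: A's pattern loop = B's three scans
theorem pv_main (l : List Char) :
    (pvAllPatterns.any (fun p => PySem.Chars.isIn p.toList l)) =
      ((l.any (fun c => pvBadChars.contains c))
        || ((l.zip l.tail).any (fun p => p.1 == p.2 && (p.1 == '*' || p.1 == '#')))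
        || ((l.zip (l.tail.zip l.tail.tail)).any
              (fun t => t.1 == t.2.1 && t.2.1 == t.2.2 && t.2.2 == '-'))) := by
  rw [Bool.eq_iff_iff]
  simp only [Bool.or_eq_true]
  rw [pv_patterns_iff, pv_adj2', pv_adj3', pv_bad']
  simp only [or_assoc]

-- ===== VERDICT (by name: the statement is the Claim_ definition above) =====
theorem has_problematic_chars_spec : Claim_equal_has_problematic_chars := by
  intro text _
  unfold Spec_has_problematic_chars has_problematic_chars has_problematic_chars_alt
  have hA : pvAllPatterns.any (fun p => PySem.Str.isIn p text) =
      pvAllPatterns.any (fun p => PySem.Chars.isIn p.toList text.toList) := by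
    simp [PySem.Str.isIn]
  rw [hA, pv_main text.toList]
  by_cases hlen : PySem.Str.len text > 500
  · rw [if_pos hlen]
    split <;> rfl
  · rw [if_neg hlen]
    split
    · rename_i h; exact h.symm
    · rename_i h; exact (Bool.eq_false_iff.mpr h).symm
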